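-- pv_equiv track=rewrite | github.com/mshsu/compsci-one | finder_funcs.py | search_forward
-- ===== SOURCE A (Python) =====
-- def search_forward(puzzle, word):
--     row_found = -1
--     col_found = -1
--     for row in range(len(puzzle)):
--         if puzzle[row].find(word) != -1:
--             row_found = row
--             col_found = puzzle[row].find(word)
--     return ('FORWARD', row_found, col_found)
-- ===== SOURCE B (Python) =====
-- def search_forward(puzzle, word):
--     for row in range(len(puzzle) - 1, -1, -1):
--         col = puzzle[row].find(word)
--         if col != -1:
--             return ('FORWARD', row, col)
--     return ('FORWARD', -1, -1)
-- ===== Notes on version B (the rewrite author's own statement) =====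
-- stated objective: simpler
-- what changed: Replaces the forward overwrite-all-rows scan with a reverse scan that returns at the first matching row (the last forward hit), so no accumulator variables and an early exit.
import Mathlib
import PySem

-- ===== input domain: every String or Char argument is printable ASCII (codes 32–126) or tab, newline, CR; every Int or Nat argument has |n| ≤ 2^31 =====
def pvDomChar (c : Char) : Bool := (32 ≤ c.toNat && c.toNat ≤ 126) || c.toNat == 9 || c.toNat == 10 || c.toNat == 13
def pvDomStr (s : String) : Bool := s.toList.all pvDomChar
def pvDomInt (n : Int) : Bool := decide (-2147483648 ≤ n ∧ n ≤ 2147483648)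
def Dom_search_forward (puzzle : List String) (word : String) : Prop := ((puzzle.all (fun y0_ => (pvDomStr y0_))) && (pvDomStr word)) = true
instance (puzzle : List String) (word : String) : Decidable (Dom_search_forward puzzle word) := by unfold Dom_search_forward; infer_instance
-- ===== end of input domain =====

-- B scans the rows from the last to the first and returns at the first match (= A's last forward hit); simpler: no accumulators, early exit. Return value only; neither version mutates.

-- ===== PORT A =====
def search_forward (puzzle : List String) (word : String) : String × Int × Int :=
  let st := (PySem.List.enumerate puzzle).foldl
    (fun (acc : Int × Int) (p : Int × String) =>
      if PySem.Str.find p.2 word ≠ -1 then (p.1, PySem.Str.find p.2 word) else acc)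
    (-1, -1)
  ("FORWARD", st.1, st.2)

-- ===== PORT B =====
-- reverse scan with early exit (the Python iterates row = len-1 … 0 and returns on the first hit)
def sfRev (word : String) : List (Int × String) → Int × Int
  | [] => (-1, -1)
  | (i, s) :: rest =>
      let col := PySem.Str.find s word
      if col ≠ -1 then (i, col) else sfRev word rest

def search_forward_alt (puzzle : List String) (word : String) : String × Int × Int :=
  let r := sfRev word (PySem.List.enumerate puzzle).reverse
  ("FORWARD", r.1, r.2)

-- ===== PRECONDITION & SPEC =====
def Spec_search_forward (puzzle : List String) (word : String) (out : String × Int × Int) : Prop := out = search_forward_alt puzzle word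
instance (puzzle : List String) (word : String) (out : String × Int × Int) : Decidable (Spec_search_forward puzzle word out) := by unfold Spec_search_forward; infer_instance

-- ===== CLAIM (what is proved, stated in full; the proofs are below) =====
def Claim_equal_search_forward : Prop := ∀ (puzzle : List String) (word : String), Dom_search_forward puzzle word → Spec_search_forward puzzle word (search_forward puzzle word)

-- ===== LEMMAS AND PROOFS =====
theorem foldl_eq_sfRev_reverse (word : String) (l : List (Int × String)) :
    l.foldl
      (fun (acc : Int × Int) (p : Int × String) =>
        if PySem.Str.find p.2 word ≠ -1 then (p.1, PySem.Str.find p.2 word) else acc)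
      (-1, -1) = sfRev word l.reverse := by
  induction l using List.reverseRecOn with
  | nil => rfl
  | append_singleton xs x ih =>
      obtain ⟨i, s⟩ := x
      simp only [List.foldl_append, List.foldl_cons, List.foldl_nil, List.reverse_append,
        List.reverse_cons, List.reverse_nil, List.nil_append, List.singleton_append, sfRev, ih]

-- ===== VERDICT (by name: the statement is the Claim_ definition above) =====
theorem search_forward_spec : Claim_equal_search_forward := by
  intro puzzle word _
  unfold Spec_search_forward search_forward search_forward_alt
  rw [foldl_eq_sfRev_reverse]
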